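-- pv_equiv track=rewrite | github.com/UKHSA-Internal/hpub-webapp-backend | health_pubs/core/products/views.py | generate_product_key
-- ===== SOURCE A (Python) =====
-- _DIGITS = list("0123456789ABCDEFGHIJKLMNOPQRSTUVWXYZ")
--
-- _BASE = len(_DIGITS)
--
-- def generate_product_key(last_key: str | None) -> str:
--     """
--     Increments a base-36 “number” whose digits run 0–9 then A–Z.
--     If last_key is None, returns '1'. Otherwise rolls over so that:
--
--       '0' → '1'
--       '9' → 'A'
--       'Z' → '10'
--       '10' → '11'
--       etc.
--     """
--     # very first key
--     if not last_key:
--         return "1"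
--
--     # turn into list of integer positions (0..35)
--     try:
--         positions = [_DIGITS.index(ch) for ch in last_key]
--     except ValueError as e:
--         raise ValueError(f"Invalid last_key: {last_key!r}") from e
--
--     # add one, carrying through
--     i, carry = len(positions) - 1, 1
--     while i >= 0 and carry:
--         positions[i] += 1
--         if positions[i] >= _BASE:
--             positions[i] = 0
--             carry = 1
--         else:
--             carry = 0
--         i -= 1
--
--     # if we still have a carry, prepend '1' (i.e. index 1 in _DIGITS)
--     if carry:
--         positions.insert(0, _DIGITS.index("1"))
--
--     # rebuild the string
--     return "".join(_DIGITS[pos] for pos in positions)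
-- ===== SOURCE B (Python) =====
-- _DIGITS = list("0123456789ABCDEFGHIJKLMNOPQRSTUVWXYZ")
--
-- def generate_product_key(last_key):
--     if not last_key:
--         return "1"
--     digitset = set(_DIGITS)
--     if any(ch not in digitset for ch in last_key):
--         raise ValueError(f"Invalid last_key: {last_key!r}")
--     value = int(last_key, 36) + 1
--     out = []
--     while value:
--         value, r = divmod(value, 36)
--         out.append(_DIGITS[r])
--     return "".join(reversed(out)).rjust(len(last_key), "0")
-- ===== Notes on version B (the rewrite author's own statement) =====
-- stated objective: alternative
-- what changed: Replaces A's per-digit-list increment with a carry loop by numeric conversion: validate, parse with int(last_key, 36), add one, re-encode via repeated divmod and left-pad with zeros to the original length.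
import Mathlib
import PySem

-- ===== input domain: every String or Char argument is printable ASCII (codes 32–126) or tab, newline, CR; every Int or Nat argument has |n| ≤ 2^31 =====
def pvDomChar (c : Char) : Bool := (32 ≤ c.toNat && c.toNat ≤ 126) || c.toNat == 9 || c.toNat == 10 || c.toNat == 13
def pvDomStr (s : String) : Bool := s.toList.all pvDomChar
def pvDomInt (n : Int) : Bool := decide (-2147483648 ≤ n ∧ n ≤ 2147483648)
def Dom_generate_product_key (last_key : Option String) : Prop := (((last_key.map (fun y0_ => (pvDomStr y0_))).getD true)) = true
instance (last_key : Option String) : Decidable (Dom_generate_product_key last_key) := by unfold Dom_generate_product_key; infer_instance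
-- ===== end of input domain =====

-- B replaces A's digit-list carry loop by numeric conversion: parse as a base-36 number,
-- add one, re-encode with repeated divmod, pad with zeros to the original length (objective: alternative).
-- ===== PORT A =====
-- _DIGITS = list("0123456789ABCDEFGHIJKLMNOPQRSTUVWXYZ")
def pvDigits : List Char := "0123456789ABCDEFGHIJKLMNOPQRSTUVWXYZ".toList
-- the `while i >= 0 and carry` loop of A, transcribed as a recursion over the REVERSED
-- position list (A walks from the last digit towards the first); returns (new reversed
-- positions, final carry)
def pvACarry : List Nat → Nat → List Nat × Nat
  | [], c => ([], c)
  | p :: rest, c =>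
    if c = 1 then
      if p + 1 ≥ 36 then
        let r := pvACarry rest 1
        (0 :: r.1, r.2)
      else
        let r := pvACarry rest 0
        ((p + 1) :: r.1, r.2)
    else
      let r := pvACarry rest c
      (p :: r.1, r.2)
def generate_product_key (last_key : Option String) : String :=
  match last_key with
  | none => "1"
  | some s =>
    if s = "" then "1"                      -- `if not last_key`
    else
      match s.toList.mapM (fun ch => pvDigits.idxOf? ch) with
      | none => ""                           -- ValueError path (excluded by Pre_)
      | some positions =>
        let r := pvACarry positions.reverse 1
        let positions' := if r.2 = 1 then 1 :: r.1.reverse else r.1.reverse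
        String.ofList (positions'.map (fun p => pvDigits.getD p '0'))
-- ===== PORT B =====
-- repeated divmod re-encoding, least-significant digit first
def pvBEncode (m : Nat) : List Char :=
  if m = 0 then [] else pvDigits.getD (m % 36) '0' :: pvBEncode (m / 36)
decreasing_by exact Nat.div_lt_self (Nat.pos_of_ne_zero (by assumption)) (by norm_num)
def generate_product_key_alt (last_key : Option String) : String :=
  match last_key with
  | none => "1"
  | some s =>
    if s = "" then "1"
    else if s.toList.all (fun c => pvDigits.contains c) then
      let v := s.toList.foldl (fun a c => a * 36 + pvDigits.idxOf c) 0  -- int(last_key, 36)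
      let res := (pvBEncode (v + 1)).reverse
      String.ofList (List.replicate (s.toList.length - res.length) '0' ++ res)  -- rjust
    else ""                                  -- ValueError path (excluded by Pre_)
-- ===== PRECONDITION & SPEC =====
-- Pre_ excludes exactly the keys containing a character outside 0-9A-Z, on which the
-- Python A (and B) raises ValueError.
def Pre_generate_product_key (last_key : Option String) : Prop :=
  ((last_key.getD "").toList.all (fun c => pvDigits.contains c)) = true
instance (last_key : Option String) : Decidable (Pre_generate_product_key last_key) := by unfold Pre_generate_product_key; infer_instance
def pvWitness_generate_product_key : Option String := some "A9Z"
def Spec_generate_product_key (last_key : Option String) (out : String) : Prop := out = generate_product_key_alt last_key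
instance (last_key : Option String) (out : String) : Decidable (Spec_generate_product_key last_key out) := by unfold Spec_generate_product_key; infer_instance
-- ===== CLAIM (what is proved, stated in full; the proofs are below) =====
def Claim_equal_generate_product_key : Prop := ∀ (last_key : Option String), Dom_generate_product_key last_key → Pre_generate_product_key last_key → Spec_generate_product_key last_key (generate_product_key last_key)
-- ===== LEMMAS AND PROOFS =====
-- value of a base-36 digit list, LEAST-significant digit first
def pvRval : List Nat → Nat
  | [] => 0
  | d :: rs => d + 36 * pvRval rs
theorem pvRval_lt (rs : List Nat) (h : ∀ d ∈ rs, d < 36) : pvRval rs < 36 ^ rs.length := by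
  induction rs with
  | nil => simp [pvRval]
  | cons d rs ih =>
    have hd := h d (by simp)
    have := ih (fun x hx => h x (by simp [hx]))
    simp only [pvRval, List.length_cons, pow_succ]
    omega
theorem pvRval_inj (rs1 rs2 : List Nat) (hl : rs1.length = rs2.length)
    (h1 : ∀ d ∈ rs1, d < 36) (h2 : ∀ d ∈ rs2, d < 36)
    (hv : pvRval rs1 = pvRval rs2) : rs1 = rs2 := by
  induction rs1 generalizing rs2 with
  | nil => cases rs2 <;> simp_all
  | cons d rs ih =>
    cases rs2 with
    | nil => simp_all
    | cons e rs2 =>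
      simp only [pvRval] at hv
      have hd := h1 d (by simp)
      have he := h2 e (by simp)
      have hde : d = e := by omega
      subst hde
      have : pvRval rs = pvRval rs2 := by omega
      have := ih rs2 (by simpa using hl) (fun x hx => h1 x (by simp [hx])) (fun x hx => h2 x (by simp [hx])) this
      simp [this]
theorem pvRval_append (xs ys : List Nat) :
    pvRval (xs ++ ys) = pvRval xs + 36 ^ xs.length * pvRval ys := by
  induction xs with
  | nil => simp [pvRval]
  | cons d xs ih => simp [pvRval, ih, pow_succ]; ring
theorem pvRval_replicate_zero (n : Nat) : pvRval (List.replicate n 0) = 0 := by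
  induction n with
  | zero => simp [pvRval]
  | succ n ih => simp [List.replicate_succ, pvRval, ih]
-- specification of A's carry loop
theorem pvACarry_zero (rs : List Nat) : pvACarry rs 0 = (rs, 0) := by
  induction rs with
  | nil => simp [pvACarry]
  | cons p rest ih => simp [pvACarry, ih]
theorem pvACarry_spec (rs : List Nat) (h : ∀ d ∈ rs, d < 36) :
    ((pvACarry rs 1).2 = 0 ∧ (pvACarry rs 1).1.length = rs.length ∧
       (∀ d ∈ (pvACarry rs 1).1, d < 36) ∧ pvRval (pvACarry rs 1).1 = pvRval rs + 1)
    ∨ ((pvACarry rs 1).2 = 1 ∧ (pvACarry rs 1).1 = List.replicate rs.length 0 ∧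
       pvRval rs + 1 = 36 ^ rs.length) := by
  induction rs with
  | nil => right; simp [pvACarry, pvRval]
  | cons p rest ih =>
    have hp := h p (by simp)
    have ih' := ih (fun x hx => h x (by simp [hx]))
    by_cases hroll : p + 1 ≥ 36
    · -- digit rolls over to 0, carry continues
      have hstep : pvACarry (p :: rest) 1 = (0 :: (pvACarry rest 1).1, (pvACarry rest 1).2) := by
        simp [pvACarry, hroll]
      have hp36 : p = 35 := by omega
      subst hp36
      rcases ih' with ⟨hc, hl, hd, hv⟩ | ⟨hc, hl, hv⟩
      · left
        refine ⟨by simp [hstep, hc], by simp [hstep, hl], ?_, ?_⟩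
        · intro d hd'
          simp [hstep] at hd'
          rcases hd' with rfl | hd' ; · omega
          exact hd d hd'
        · rw [hstep]; simp [pvRval, hv]; ring
      · right
        refine ⟨by simp [hstep, hc], by simp [hstep, hl, List.replicate_succ], ?_⟩
        simp only [pvRval, List.length_cons, pow_succ]
        omega
    · -- digit increments, carry stops
      have hstep : pvACarry (p :: rest) 1 = ((p + 1) :: (pvACarry rest 0).1, (pvACarry rest 0).2) := by
        simp [pvACarry, hroll]
      left
      rw [hstep, pvACarry_zero]
      refine ⟨rfl, by simp, ?_, ?_⟩
      · intro d hd'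
        simp at hd'
        rcases hd' with rfl | hd' ; · omega
        exact h d (by simp [hd'])
      · simp [pvRval]; ring
-- digit-level view of B's encoder
def pvBEnc (m : Nat) : List Nat :=
  if m = 0 then [] else m % 36 :: pvBEnc (m / 36)
decreasing_by exact Nat.div_lt_self (Nat.pos_of_ne_zero (by assumption)) (by norm_num)
theorem pvBEncode_eq_map (m : Nat) :
    pvBEncode m = (pvBEnc m).map (fun p => pvDigits.getD p '0') := by
  induction m using Nat.strong_induction_on with
  | _ m ih =>
    by_cases hm : m = 0
    · simp [pvBEncode, pvBEnc, hm]
    · rw [pvBEncode, pvBEnc]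
      simp only [hm, if_false, List.map_cons]
      rw [ih (m / 36) (Nat.div_lt_self (Nat.pos_of_ne_zero hm) (by norm_num))]
theorem pvBEnc_rval (m : Nat) : pvRval (pvBEnc m) = m := by
  induction m using Nat.strong_induction_on with
  | _ m ih =>
    by_cases hm : m = 0
    · simp [pvBEnc, hm, pvRval]
    · rw [pvBEnc]
      simp only [hm, if_false, pvRval]
      rw [ih (m / 36) (Nat.div_lt_self (Nat.pos_of_ne_zero hm) (by norm_num))]
      omega
theorem pvBEnc_lt (m : Nat) : ∀ d ∈ pvBEnc m, d < 36 := by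
  induction m using Nat.strong_induction_on with
  | _ m ih =>
    by_cases hm : m = 0
    · simp [pvBEnc, hm]
    · rw [pvBEnc]
      simp only [hm, if_false]
      intro d hd
      simp at hd
      rcases hd with rfl | hd
      · omega
      · exact ih (m / 36) (Nat.div_lt_self (Nat.pos_of_ne_zero hm) (by norm_num)) d hd
theorem pvBEnc_length_le (m n : Nat) (h : m < 36 ^ n) : (pvBEnc m).length ≤ n := by
  induction n generalizing m with
  | zero =>
    have : m = 0 := by simpa using h
    simp [pvBEnc, this]
  | succ n ih =>
    by_cases hm : m = 0
    · simp [pvBEnc, hm]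
    · rw [pvBEnc]
      simp only [hm, if_false, List.length_cons]
      have : m / 36 < 36 ^ n := by
        apply Nat.div_lt_of_lt_mul
        rw [pow_succ] at h
        omega
      exact Nat.succ_le_succ (ih _ this)
theorem pvBEnc_pow_length (n : Nat) : (pvBEnc (36 ^ n)).length = n + 1 := by
  induction n with
  | zero => rw [pvBEnc]; simp [pvBEnc]
  | succ n ih =>
    rw [pvBEnc]
    have h36 : (36:Nat) ^ (n+1) ≠ 0 := by positivity
    simp only [h36, if_false, List.length_cons]
    have : 36 ^ (n + 1) / 36 = 36 ^ n := by
      rw [pow_succ]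
      exact Nat.mul_div_cancel _ (by norm_num)
    rw [this, ih]
-- parsing: A's mapM succeeds and B's fold computes the value of the same digit list
theorem pv_mapM_idxOf (l : List Char) (h : ∀ c ∈ l, c ∈ pvDigits) :
    l.mapM (fun ch => pvDigits.idxOf? ch) = some (l.map (fun ch => pvDigits.idxOf ch)) := by
  induction l with
  | nil => simp
  | cons c l ih =>
    have hc : pvDigits.idxOf? c = some (pvDigits.idxOf c) := by
      simp [List.idxOf?, List.idxOf, List.findIdx?_eq_some_iff_findIdx_eq]
      exact h c (by simp)
    rw [List.mapM_cons, hc, ih (fun x hx => h x (by simp [hx]))]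
    rfl
theorem pv_foldl_val (l : List Char) (a : Nat) :
    l.foldl (fun a c => a * 36 + pvDigits.idxOf c) a
      = a * 36 ^ l.length + pvRval (l.map (fun ch => pvDigits.idxOf ch)).reverse := by
  induction l generalizing a with
  | nil => simp [pvRval]
  | cons c l ih =>
    simp only [List.foldl_cons, List.map_cons, List.reverse_cons, ih, pvRval_append,
      List.length_reverse, List.length_map, List.length_cons, pvRval, pow_succ]
    ring
-- ===== VERDICT (by name: the statement is the Claim_ definition above) =====
theorem generate_product_key_spec : Claim_equal_generate_product_key := by
  intro last_key _hdom hpre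
  unfold Spec_generate_product_key
  match last_key with
  | none => rfl
  | some s =>
    by_cases hs : s = ""
    · simp [generate_product_key, generate_product_key_alt, hs]
    · have hallb : s.toList.all (fun c => pvDigits.contains c) = true := hpre
      have hall : ∀ c ∈ s.toList, c ∈ pvDigits := by
        intro c hc
        exact (List.contains_iff_mem).mp (List.all_eq_true.mp hallb c hc)
      -- the common digit list
      set ps := s.toList.map (fun ch => pvDigits.idxOf ch) with hps
      have hpslt : ∀ d ∈ ps, d < 36 := by
        intro d hd
        simp [hps] at hd
        obtain ⟨c, hc, rfl⟩ := hd
        have := List.idxOf_lt_length_of_mem (hall c hc)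
        simpa [pvDigits] using this
      set v := pvRval ps.reverse with hv
      have hrslt : ∀ d ∈ ps.reverse, d < 36 := fun d hd => hpslt d (List.mem_reverse.mp hd)
      have hfold : s.toList.foldl (fun a c => a * 36 + pvDigits.idxOf c) 0 = v := by
        rw [pv_foldl_val]; simp [hv, hps]
      -- unfold both ports
      rw [generate_product_key, generate_product_key_alt]
      simp only [hs, if_false, hallb, if_true, pv_mapM_idxOf s.toList hall, ← hps, hfold]
      set n := s.toList.length with hn
      have hpslen : ps.length = n := by simp [hps, hn]
      rcases pvACarry_spec ps.reverse hrslt with ⟨hc, hl, hd, hval⟩ | ⟨hc, hl, hval⟩ <;> simp only [List.length_reverse] at hl hval ⊢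
      · -- no final carry: result has length n and value v + 1
        have hvlt : v + 1 ≤ 36 ^ n := by
          have := pvRval_lt ps.reverse hrslt
          simp [hpslen] at this
          omega
        have hvlt' : v + 1 < 36 ^ n := by
          have := pvRval_lt (pvACarry ps.reverse 1).1 hd
          rw [hval, hl] at this
          simpa [hpslen] using this
        have hbl : (pvBEnc (v + 1)).length ≤ n := pvBEnc_length_le _ _ hvlt'
        -- both outputs are maps of equal digit lists
        have key : (pvACarry ps.reverse 1).1.reverse
            = List.replicate (n - (pvBEnc (v+1)).length) 0 ++ (pvBEnc (v+1)).reverse := by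
          have h1 : ∀ d ∈ (pvACarry ps.reverse 1).1.reverse, d < 36 := by
            intro d hd'; exact hd d (List.mem_reverse.mp hd')
          have h2 : ∀ d ∈ List.replicate (n - (pvBEnc (v+1)).length) 0 ++ (pvBEnc (v+1)).reverse, d < 36 := by
            intro d hd'
            simp at hd'
            rcases hd' with ⟨_, rfl⟩ | hd'
            · omega
            · exact pvBEnc_lt _ d hd'
          apply List.reverse_injective
          apply pvRval_inj
          · simp [hl, hpslen]; omega
          · intro d hd'; exact h1 d (by simpa using hd')
          · intro d hd'
            simp at hd'
            rcases hd' with hd' | ⟨_, rfl⟩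
            · exact pvBEnc_lt _ d hd'
            · omega
          · simp only [List.reverse_reverse, List.reverse_append, List.reverse_replicate,
              pvRval_append, pvRval_replicate_zero, pvBEnc_rval,
              Nat.mul_zero, Nat.add_zero]
            rw [hval, hv]
        rw [hc]
        simp only [if_neg (by norm_num : (0:Nat) ≠ 1)]
        rw [key, pvBEncode_eq_map]
        congr 1
        simp [List.map_append, List.map_replicate, List.map_reverse, List.length_map]
        exact Or.inr (by decide)
      · -- final carry: v + 1 = 36 ^ n, result is '1' followed by n zeros
        have hval' : v + 1 = 36 ^ n := by rw [hv, hval, hpslen]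
        have hblen : (pvBEnc (v+1)).length = n + 1 := by rw [hval']; exact pvBEnc_pow_length n
        have key : (1 :: (pvACarry ps.reverse 1).1.reverse)
            = List.replicate (n - (pvBEnc (v+1)).length) 0 ++ (pvBEnc (v+1)).reverse := by
          have hsub : n - (pvBEnc (v+1)).length = 0 := by omega
          rw [hsub, List.replicate_zero, List.nil_append]
          apply List.reverse_injective
          apply pvRval_inj
          · simp [hl, hpslen, hblen]
          · intro d hd'
            simp [hl] at hd'
            rcases hd' with hd' | rfl
            · omega
            · omega
          · intro d hd'
            exact pvBEnc_lt _ d (by simpa using hd')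
          · rw [List.reverse_reverse, List.reverse_cons, List.reverse_reverse, hl]
            rw [pvRval_append, pvRval_replicate_zero, pvBEnc_rval]
            simp [pvRval, List.length_replicate, hpslen, hval']
        rw [hc]
        rw [key, pvBEncode_eq_map]
        congr 1
        simp [List.map_append, List.map_replicate, List.map_reverse, List.length_map]
        exact Or.inr (by decide)
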